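-- pv_equiv track=rewrite | github.com/OZmasterAI/Torus-Framework | hooks/shared/pipeline_optimizer.py | _identify_parallel_groups
-- ===== SOURCE A (Python) =====
-- from typing import Dict, List, Optional, Set, Tuple
--
-- _GATE_STATE_DEPS: Dict[str, Dict[str, List[str]]] = {
--     "gate_01_read_before_edit":   {"reads": ["files_read"],              "writes": []},
--     "gate_02_no_destroy":         {"reads": [],                          "writes": []},
--     "gate_03_test_before_deploy": {"reads": ["last_test_run", "last_test_exit_code"], "writes": []},
--     "gate_04_memory_first":       {"reads": ["memory_last_queried"],     "writes": []},
--     "gate_05_proof_before_fixed": {"reads": ["pending_verification", "verification_scores"], "writes": []},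
--     "gate_06_save_fix":           {
--         "reads":  ["gate6_warn_count", "verified_fixes", "unlogged_errors",
--                    "error_pattern_counts", "pending_chain_ids", "last_exit_plan_mode",
--                    "memory_last_queried"],
--         "writes": ["gate6_warn_count"],
--     },
--     "gate_07_critical_file_guard": {"reads": ["memory_last_queried"],   "writes": []},
--     "gate_09_strategy_ban":        {"reads": ["current_strategy_id", "active_bans", "successful_strategies"], "writes": []},
--     "gate_10_model_enforcement":   {"reads": [],                        "writes": ["model_agent_usage"]},
--     "gate_11_rate_limit":          {"reads": ["tool_call_count", "session_start"], "writes": []},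
--     "gate_13_workspace_isolation": {"reads": [],                        "writes": []},
--     "gate_14_confidence_check":    {
--         "reads":  ["session_test_baseline", "pending_verification",
--                    "memory_last_queried", "confidence_warnings_per_file"],
--         "writes": ["confidence_warnings_per_file", "confidence_warned_signals"],
--     },
--     "gate_15_causal_chain":   {"reads": ["recent_test_failure", "fix_history_queried", "fixing_error"], "writes": []},
--     "gate_16_code_quality":   {"reads": ["code_quality_warnings_per_file"], "writes": ["code_quality_warnings_per_file"]},
--     "gate_17_injection_defense": {"reads": ["injection_attempts"], "writes": ["injection_attempts"]},
-- }
--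
-- def _are_parallelizable(gate_a: str, gate_b: str) -> bool:
--     """Return True if gate_a and gate_b can run concurrently without state conflicts.
--
--     Two gates are safe to parallelize when neither gate's *writes* overlap with
--     the other gate's *reads* or *writes*.  Gates with no state writes and no
--     shared reads are trivially parallelizable.
--     """
--     deps_a = _GATE_STATE_DEPS.get(gate_a, {"reads": [], "writes": []})
--     deps_b = _GATE_STATE_DEPS.get(gate_b, {"reads": [], "writes": []})
--
--     writes_a = set(deps_a.get("writes", []))
--     writes_b = set(deps_b.get("writes", []))
--     reads_a = set(deps_a.get("reads", []))
--     reads_b = set(deps_b.get("reads", []))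
--
--     # Write-read conflict: a writes something b reads
--     if writes_a & reads_b:
--         return False
--     # Write-read conflict: b writes something a reads
--     if writes_b & reads_a:
--         return False
--     # Write-write conflict: both write the same key
--     if writes_a & writes_b:
--         return False
--
--     return True
--
-- def _identify_parallel_groups(short_names: List[str]) -> List[List[str]]:
--     """Greedily partition gate short names into parallelizable groups.
--
--     Each group can run concurrently.  Gates are assigned to the first group
--     where they conflict with no existing member.  This is a greedy bin-packing
--     approximation, not an optimal solution, but it's fast and good enough for
--     the small gate counts involved.
--
--     Parameters
--     ----------
--     short_names:
--         Ordered list of gate short names (e.g. "gate_04_memory_first").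
--
--     Returns
--     -------
--     list[list[str]]
--         List of groups; each group is a list of gate short names that can
--         execute concurrently.  Groups are ordered by execution sequence —
--         all gates in group N complete before group N+1 starts.
--     """
--     groups: List[List[str]] = []
--
--     for gate in short_names:
--         placed = False
--         for group in groups:
--             if all(_are_parallelizable(gate, member) for member in group):
--                 group.append(gate)
--                 placed = True
--                 break
--         if not placed:
--             groups.append([gate])
--
--     return groups
-- ===== SOURCE B (Python) =====
-- from typing import Dict, List
--
-- _GATE_STATE_DEPS: Dict[str, Dict[str, List[str]]] = {
--     "gate_01_read_before_edit":   {"reads": ["files_read"],              "writes": []},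
--     "gate_02_no_destroy":         {"reads": [],                          "writes": []},
--     "gate_03_test_before_deploy": {"reads": ["last_test_run", "last_test_exit_code"], "writes": []},
--     "gate_04_memory_first":       {"reads": ["memory_last_queried"],     "writes": []},
--     "gate_05_proof_before_fixed": {"reads": ["pending_verification", "verification_scores"], "writes": []},
--     "gate_06_save_fix":           {
--         "reads":  ["gate6_warn_count", "verified_fixes", "unlogged_errors",
--                    "error_pattern_counts", "pending_chain_ids", "last_exit_plan_mode",
--                    "memory_last_queried"],
--         "writes": ["gate6_warn_count"],
--     },
--     "gate_07_critical_file_guard": {"reads": ["memory_last_queried"],   "writes": []},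
--     "gate_09_strategy_ban":        {"reads": ["current_strategy_id", "active_bans", "successful_strategies"], "writes": []},
--     "gate_10_model_enforcement":   {"reads": [],                        "writes": ["model_agent_usage"]},
--     "gate_11_rate_limit":          {"reads": ["tool_call_count", "session_start"], "writes": []},
--     "gate_13_workspace_isolation": {"reads": [],                        "writes": []},
--     "gate_14_confidence_check":    {
--         "reads":  ["session_test_baseline", "pending_verification",
--                    "memory_last_queried", "confidence_warnings_per_file"],
--         "writes": ["confidence_warnings_per_file", "confidence_warned_signals"],
--     },
--     "gate_15_causal_chain":   {"reads": ["recent_test_failure", "fix_history_queried", "fixing_error"], "writes": []},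
--     "gate_16_code_quality":   {"reads": ["code_quality_warnings_per_file"], "writes": ["code_quality_warnings_per_file"]},
--     "gate_17_injection_defense": {"reads": ["injection_attempts"], "writes": ["injection_attempts"]},
-- }
--
-- def _identify_parallel_groups(short_names: List[str]) -> List[List[str]]:
--     """Greedy partition using per-group aggregate read/write sets instead of
--     re-checking every individual member of every group."""
--     state = []  # entries [members, reads_union, writes_union]
--     for gate in short_names:
--         deps = _GATE_STATE_DEPS.get(gate, {"reads": [], "writes": []})
--         rg = set(deps.get("reads", []))
--         wg = set(deps.get("writes", []))
--         for entry in state: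
--             members, R, W = entry
--             if wg.isdisjoint(R) and rg.isdisjoint(W) and wg.isdisjoint(W):
--                 members.append(gate)
--                 entry[1] = R | rg
--                 entry[2] = W | wg
--                 break
--         else:
--             state.append([[gate], rg, wg])
--     return [entry[0] for entry in state]
-- ===== Notes on version B (the rewrite author's own statement) =====
-- stated objective: faster
-- what changed: Instead of re-testing the new gate pairwise against every already-placed member of every group (rebuilding both gates' read/write sets per pair), B maintains per-group aggregate read/write union sets and tests the gate's own read/write sets once against each group's two aggregates, updating them incrementally on placement.
import Mathlib
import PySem

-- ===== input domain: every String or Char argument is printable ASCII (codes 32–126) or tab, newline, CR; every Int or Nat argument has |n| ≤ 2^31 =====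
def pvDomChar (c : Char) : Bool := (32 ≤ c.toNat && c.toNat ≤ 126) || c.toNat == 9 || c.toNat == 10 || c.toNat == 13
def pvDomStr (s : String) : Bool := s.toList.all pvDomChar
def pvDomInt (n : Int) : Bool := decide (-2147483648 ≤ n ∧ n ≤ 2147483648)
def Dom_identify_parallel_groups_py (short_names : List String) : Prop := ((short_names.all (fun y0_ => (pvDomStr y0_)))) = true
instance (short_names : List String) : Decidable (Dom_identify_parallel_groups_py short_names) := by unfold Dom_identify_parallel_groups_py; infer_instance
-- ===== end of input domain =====

-- B keeps per-group aggregate read/write sets so each gate is tested against one pair of sets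
-- per group instead of against every member of the group (objective: alternative decomposition).

-- ===== PORT A =====
-- _GATE_STATE_DEPS: each value is a dict that always carries both keys "reads" and "writes",
-- ported as the pair (reads, writes).
def pvGateDeps : PySem.Dict String (List String × List String) := ⟨[
  ("gate_01_read_before_edit", (["files_read"], [])),
  ("gate_02_no_destroy", ([], [])),
  ("gate_03_test_before_deploy", (["last_test_run", "last_test_exit_code"], [])),
  ("gate_04_memory_first", (["memory_last_queried"], [])),
  ("gate_05_proof_before_fixed", (["pending_verification", "verification_scores"], [])),
  ("gate_06_save_fix", (["gate6_warn_count", "verified_fixes", "unlogged_errors", "error_pattern_counts", "pending_chain_ids", "last_exit_plan_mode", "memory_last_queried"], ["gate6_warn_count"])),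
  ("gate_07_critical_file_guard", (["memory_last_queried"], [])),
  ("gate_09_strategy_ban", (["current_strategy_id", "active_bans", "successful_strategies"], [])),
  ("gate_10_model_enforcement", ([], ["model_agent_usage"])),
  ("gate_11_rate_limit", (["tool_call_count", "session_start"], [])),
  ("gate_13_workspace_isolation", ([], [])),
  ("gate_14_confidence_check", (["session_test_baseline", "pending_verification", "memory_last_queried", "confidence_warnings_per_file"], ["confidence_warnings_per_file", "confidence_warned_signals"])),
  ("gate_15_causal_chain", (["recent_test_failure", "fix_history_queried", "fixing_error"], [])),
  ("gate_16_code_quality", (["code_quality_warnings_per_file"], ["code_quality_warnings_per_file"])),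
  ("gate_17_injection_defense", (["injection_attempts"], ["injection_attempts"]))]⟩

-- _are_parallelizable: truthiness of a set intersection = the intersection list is non-empty
def are_parallelizable_py (gate_a gate_b : String) : Bool :=
  let deps_a := PySem.Dict.getD pvGateDeps gate_a ([], [])
  let deps_b := PySem.Dict.getD pvGateDeps gate_b ([], [])
  let writes_a : PySem.Set String := PySem.Set.ofList deps_a.2
  let writes_b : PySem.Set String := PySem.Set.ofList deps_b.2
  let reads_a : PySem.Set String := PySem.Set.ofList deps_a.1
  let reads_b : PySem.Set String := PySem.Set.ofList deps_b.1
  if !(PySem.Set.inter writes_a reads_b).isEmpty then false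
  else if !(PySem.Set.inter writes_b reads_a).isEmpty then false
  else if !(PySem.Set.inter writes_a writes_b).isEmpty then false
  else true

-- inner 'for group in groups: … break' with the placed flag: first group whose every member
-- is parallelizable with the gate receives it; otherwise a fresh singleton group at the end
def pvPlaceA (gate : String) : List (List String) → List (List String)
  | [] => [[gate]]
  | group :: rest =>
    if group.all (fun member => are_parallelizable_py gate member) then
      (group ++ [gate]) :: rest
    else
      group :: pvPlaceA gate rest

def identify_parallel_groups_py (short_names : List String) : List (List String) :=
  short_names.foldl (fun groups gate => pvPlaceA gate groups) []

-- ===== PORT B =====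
-- state entry = (members, union of members' reads, union of members' writes)
def pvPlaceB (gate : String) (rg wg : PySem.Set String) :
    List (List String × PySem.Set String × PySem.Set String) →
    List (List String × PySem.Set String × PySem.Set String)
  | [] => [([gate], rg, wg)]
  | (members, r, w) :: rest =>
    if PySem.Set.isdisjoint wg r && PySem.Set.isdisjoint rg w && PySem.Set.isdisjoint wg w then
      (members ++ [gate], PySem.Set.union r rg, PySem.Set.union w wg) :: rest
    else
      (members, r, w) :: pvPlaceB gate rg wg rest

def pvStepB (state : List (List String × PySem.Set String × PySem.Set String))
    (gate : String) : List (List String × PySem.Set String × PySem.Set String) :=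
  let deps := PySem.Dict.getD pvGateDeps gate ([], [])
  pvPlaceB gate (PySem.Set.ofList deps.1) (PySem.Set.ofList deps.2) state

def identify_parallel_groups_py_alt (short_names : List String) : List (List String) :=
  (short_names.foldl pvStepB []).map (fun entry => entry.1)

-- ===== PRECONDITION & SPEC =====
def Spec_identify_parallel_groups_py (short_names : List String) (out : List (List String)) : Prop := out = identify_parallel_groups_py_alt short_names
instance (short_names : List String) (out : List (List String)) : Decidable (Spec_identify_parallel_groups_py short_names out) := by unfold Spec_identify_parallel_groups_py; infer_instance

-- ===== CLAIM (what is proved, stated in full; the proofs are below) =====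
def Claim_equal_identify_parallel_groups_py : Prop := ∀ (short_names : List String), Dom_identify_parallel_groups_py short_names → Spec_identify_parallel_groups_py short_names (identify_parallel_groups_py short_names)

-- ===== LEMMAS AND PROOFS =====

def pvReadsOf (gate : String) : List String := (PySem.Dict.getD pvGateDeps gate ([], [])).1
def pvWritesOf (gate : String) : List String := (PySem.Dict.getD pvGateDeps gate ([], [])).2

-- the aggregate sets of a state entry are exactly the unions of its members' reads / writes
def pvGoodEntry (e : List String × PySem.Set String × PySem.Set String) : Prop :=
  (∀ x, x ∈ e.2.1 ↔ ∃ m ∈ e.1, x ∈ pvReadsOf m) ∧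
  (∀ x, x ∈ e.2.2 ↔ ∃ m ∈ e.1, x ∈ pvWritesOf m)

theorem pv_par_iff (a b : String) :
    are_parallelizable_py a b = true ↔
      ((∀ x ∈ pvWritesOf a, x ∉ pvReadsOf b) ∧ (∀ x ∈ pvWritesOf b, x ∉ pvReadsOf a) ∧
       (∀ x ∈ pvWritesOf a, x ∉ pvWritesOf b)) := by
  simp [are_parallelizable_py, PySem.Set.inter, List.filter_eq_nil_iff,
    PySem.Set.mem_ofList, pvReadsOf, pvWritesOf]

theorem pv_cond_eq (gate : String) (mems : List String) (r w : PySem.Set String)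
    (he : pvGoodEntry (mems, r, w)) :
    (PySem.Set.isdisjoint (PySem.Set.ofList (pvWritesOf gate)) r &&
     PySem.Set.isdisjoint (PySem.Set.ofList (pvReadsOf gate)) w &&
     PySem.Set.isdisjoint (PySem.Set.ofList (pvWritesOf gate)) w) =
      mems.all (fun member => are_parallelizable_py gate member) := by
  obtain ⟨hr, hw⟩ := he
  simp only at hr hw
  rw [Bool.eq_iff_iff]
  simp only [Bool.and_eq_true, PySem.Set.isdisjoint_iff, PySem.Set.mem_ofList,
    List.all_eq_true, pv_par_iff, hr, hw]
  constructor
  · rintro ⟨⟨h1, h2⟩, h3⟩ m hm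
    exact ⟨fun x hx hx' => h1 x hx ⟨m, hm, hx'⟩,
           fun x hx hx' => h2 x hx' ⟨m, hm, hx⟩,
           fun x hx hx' => h3 x hx ⟨m, hm, hx'⟩⟩
  · intro h
    exact ⟨⟨fun x hx hmem => (fun ⟨m, hm, hx'⟩ => (h m hm).1 x hx hx') hmem,
            fun x hx hmem => (fun ⟨m, hm, hx'⟩ => (h m hm).2.1 x hx' hx) hmem⟩,
           fun x hx hmem => (fun ⟨m, hm, hx'⟩ => (h m hm).2.2 x hx hx') hmem⟩

theorem pv_placeB_step (gate : String)
    (st : List (List String × PySem.Set String × PySem.Set String))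
    (h : ∀ e ∈ st, pvGoodEntry e) :
    (pvPlaceB gate (PySem.Set.ofList (pvReadsOf gate)) (PySem.Set.ofList (pvWritesOf gate)) st).map
        (fun entry => entry.1) = pvPlaceA gate (st.map (fun entry => entry.1)) ∧
    ∀ e ∈ pvPlaceB gate (PySem.Set.ofList (pvReadsOf gate)) (PySem.Set.ofList (pvWritesOf gate)) st,
      pvGoodEntry e := by
  induction st with
  | nil =>
    refine ⟨rfl, ?_⟩
    intro e he
    simp only [pvPlaceB, List.mem_singleton] at he
    subst he
    constructor <;> intro x <;> simp [PySem.Set.mem_ofList]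
  | cons e rest ih =>
    obtain ⟨m, r, w⟩ := e
    have hge : pvGoodEntry (m, r, w) := h _ (List.mem_cons_self ..)
    have hrest : ∀ e ∈ rest, pvGoodEntry e := fun e he => h e (List.mem_cons_of_mem _ he)
    obtain ⟨ih1, ih2⟩ := ih hrest
    have hc := pv_cond_eq gate m r w hge
    simp only [pvPlaceB, pvPlaceA, List.map_cons, hc]
    split_ifs with hall
    · refine ⟨by simp, ?_⟩
      intro e he
      rcases List.mem_cons.mp he with he | he
      · subst he
        obtain ⟨hr, hw⟩ := hge
        simp only at hr hw
        constructor <;> intro x <;>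
          simp only [PySem.Set.mem_union, PySem.Set.mem_ofList, hr, hw, List.mem_append,
            List.mem_singleton, pvReadsOf, pvWritesOf] <;> aesop
      · exact hrest e he
    · refine ⟨by simp [ih1], ?_⟩
      intro e he
      rcases List.mem_cons.mp he with he | he
      · subst he; exact hge
      · exact ih2 e he

theorem pv_foldl_eq (names : List String)
    (st : List (List String × PySem.Set String × PySem.Set String))
    (h : ∀ e ∈ st, pvGoodEntry e) :
    (names.foldl pvStepB st).map (fun entry => entry.1) =
      names.foldl (fun groups gate => pvPlaceA gate groups) (st.map (fun entry => entry.1)) := by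
  induction names generalizing st with
  | nil => rfl
  | cons g gs ih =>
    obtain ⟨h1, h2⟩ := pv_placeB_step g st h
    simp only [List.foldl_cons]
    have hstep : pvStepB st g
        = pvPlaceB g (PySem.Set.ofList (pvReadsOf g)) (PySem.Set.ofList (pvWritesOf g)) st := rfl
    rw [hstep, ih _ h2, h1]

-- ===== VERDICT (by name: the statement is the Claim_ definition above) =====
theorem identify_parallel_groups_py_spec : Claim_equal_identify_parallel_groups_py := by
  intro short_names _
  unfold Spec_identify_parallel_groups_py identify_parallel_groups_py identify_parallel_groups_py_alt
  rw [pv_foldl_eq short_names [] (by simp)]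
  rfl
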